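-- pv_equiv track=rewrite | github.com/envasquez/SABC | routes/pages/calendar_structure.py | add_event_marker
-- ===== SOURCE A (Python) =====
-- from typing import Any, Dict, List
--
-- def add_event_marker(
--     month: int, day: int, all_events: Dict[int, Dict[int, List[Dict[str, str]]]]
-- ) -> str:
--     """Add visual marker to day based on event types."""
--     day_str = str(day)
--
--     if month in all_events and day in all_events[month]:
--         events_for_day = all_events[month][day]
--         has_sabc = any(e["type"] == "sabc_tournament" for e in events_for_day)
--         has_club_event = any(e["type"] == "club_event" for e in events_for_day)
--         has_holiday = any(e["type"] == "holiday" for e in events_for_day)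
--         has_other = any(e["type"] == "other_tournament" for e in events_for_day)
--
--         if has_sabc:
--             day_str += "†"
--         elif has_club_event:
--             day_str += "§"
--         elif has_other:
--             day_str += "‡"
--         elif has_holiday:
--             day_str += "*"
--
--     return day_str
-- ===== SOURCE B (Python) =====
-- _PRIORITY = {"sabc_tournament": 0, "club_event": 1, "other_tournament": 2, "holiday": 3}
-- _MARKS = ["\u2020", "\u00a7", "\u2021", "*", ""]
--
-- def add_event_marker(month, day, all_events):
--     """Add visual marker to day based on event types."""
--     day_str = str(day)
--     events_for_day = all_events.get(month, {}).get(day)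
--     if events_for_day is None:
--         return day_str
--     best = min((_PRIORITY.get(e["type"], 4) for e in events_for_day), default=4)
--     return day_str + _MARKS[best]
-- ===== Notes on version B (the rewrite author's own statement) =====
-- stated objective: alternative
-- what changed: Replaces the four boolean any() scans and the four-branch if/elif chain by a numeric min-reduction: each event's type is mapped to a priority rank, min(..., default=4) picks the best rank in one pass, and the marker is read from a rank-indexed symbol table.
import Mathlib
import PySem

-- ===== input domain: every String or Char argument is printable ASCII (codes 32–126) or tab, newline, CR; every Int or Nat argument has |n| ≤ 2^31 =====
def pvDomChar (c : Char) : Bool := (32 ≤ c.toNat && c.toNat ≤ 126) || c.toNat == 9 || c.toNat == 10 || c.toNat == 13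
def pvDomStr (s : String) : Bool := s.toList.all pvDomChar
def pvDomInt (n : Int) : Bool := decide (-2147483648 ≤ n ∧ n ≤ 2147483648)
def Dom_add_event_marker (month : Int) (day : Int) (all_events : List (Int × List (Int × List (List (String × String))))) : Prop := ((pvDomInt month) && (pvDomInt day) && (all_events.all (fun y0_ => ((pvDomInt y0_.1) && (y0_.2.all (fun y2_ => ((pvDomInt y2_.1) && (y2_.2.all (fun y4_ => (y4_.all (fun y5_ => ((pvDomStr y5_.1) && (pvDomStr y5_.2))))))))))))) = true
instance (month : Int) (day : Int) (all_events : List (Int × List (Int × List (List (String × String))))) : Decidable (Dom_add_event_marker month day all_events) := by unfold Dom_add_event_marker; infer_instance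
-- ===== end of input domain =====

-- B replaces A's four any() scans + if/elif chain by a numeric min-reduction over per-event
-- priority ranks and a rank-indexed marker table (objective: alternative decomposition).

-- e["type"]; under Pre_ the key is present, so the default "" is never the value Python raised on
def pvTypeOf (e : List (String × String)) : String :=
  ((PySem.Dict.mk e).get? "type").getD ""

-- ===== PORT A =====
def add_event_marker (month : Int) (day : Int) (all_events : List (Int × List (Int × List (List (String × String))))) : String :=
  let day_str := PySem.Int.toStr day
  match (PySem.Dict.mk all_events).get? month with
  | none => day_str
  | some md =>
    match (PySem.Dict.mk md).get? day with
    | none => day_str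
    | some events_for_day =>
      let has_sabc := events_for_day.any (fun e => pvTypeOf e == "sabc_tournament")
      let has_club_event := events_for_day.any (fun e => pvTypeOf e == "club_event")
      let has_holiday := events_for_day.any (fun e => pvTypeOf e == "holiday")
      let has_other := events_for_day.any (fun e => pvTypeOf e == "other_tournament")
      if has_sabc then day_str ++ "†"
      else if has_club_event then day_str ++ "§"
      else if has_other then day_str ++ "‡"
      else if has_holiday then day_str ++ "*"
      else day_str

-- ===== PORT B =====
-- _PRIORITY.get(e["type"], 4)
def pvRank (e : List (String × String)) : Int :=
  PySem.Dict.getD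
    (PySem.Dict.mk [("sabc_tournament", (0 : Int)), ("club_event", 1),
                    ("other_tournament", 2), ("holiday", 3)])
    (pvTypeOf e) 4

def pvMarks : List String := ["†", "§", "‡", "*", ""]

def add_event_marker_alt (month : Int) (day : Int) (all_events : List (Int × List (Int × List (List (String × String))))) : String :=
  let day_str := PySem.Int.toStr day
  -- all_events.get(month, {}).get(day); 'is None' ↔ the none branch
  match (PySem.Dict.mk ((PySem.Dict.mk all_events).getD month [])).get? day with
  | none => day_str
  | some events_for_day =>
    -- min((_PRIORITY.get(e["type"], 4) for e in events_for_day), default=4)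
    let best : Int :=
      match PySem.List.min? (events_for_day.map pvRank) (fun x => x) with
      | none => 4
      | some m => m
    -- _MARKS[best]; best is always in range, the getD "" is only a totality guard
    day_str ++ ((PySem.List.pyGet? pvMarks best).getD "")

-- ===== PRECONDITION & SPEC =====
-- Pre_ excludes inputs whose selected day list contains an event dict without a "type" key:
-- Python A usually raises KeyError there (and B always does); the cases where A still returns
-- depend only on the accidental short-circuit order of its four any() scans.
def Pre_add_event_marker (month : Int) (day : Int) (all_events : List (Int × List (Int × List (List (String × String))))) : Prop :=
  (((PySem.Dict.mk all_events).get? month).all fun md =>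
    (((PySem.Dict.mk md).get? day).all fun evs =>
      evs.all fun e => (PySem.Dict.mk e).contains "type")) = true
instance (month : Int) (day : Int) (all_events : List (Int × List (Int × List (List (String × String))))) : Decidable (Pre_add_event_marker month day all_events) := by unfold Pre_add_event_marker; infer_instance

def pvWitness_add_event_marker : Int × Int × (List (Int × List (Int × List (List (String × String))))) :=
  (3, 7, [(3, [(7, [[("type", "club_event")], [("type", "holiday")]])])])

def Spec_add_event_marker (month : Int) (day : Int) (all_events : List (Int × List (Int × List (List (String × String))))) (out : String) : Prop := out = add_event_marker_alt month day all_events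
instance (month : Int) (day : Int) (all_events : List (Int × List (Int × List (List (String × String))))) (out : String) : Decidable (Spec_add_event_marker month day all_events out) := by unfold Spec_add_event_marker; infer_instance

-- ===== CLAIM (what is proved, stated in full; the proofs are below) =====
def Claim_equal_add_event_marker : Prop := ∀ (month : Int) (day : Int) (all_events : List (Int × List (Int × List (List (String × String))))), Dom_add_event_marker month day all_events → Pre_add_event_marker month day all_events → Spec_add_event_marker month day all_events (add_event_marker month day all_events)

-- ===== LEMMAS AND PROOFS =====

-- the priority chain A's elif order realizes, as an Int
def pvChain (evs : List (List (String × String))) : Int :=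
  if evs.any (fun e => pvTypeOf e == "sabc_tournament") then 0
  else if evs.any (fun e => pvTypeOf e == "club_event") then 1
  else if evs.any (fun e => pvTypeOf e == "other_tournament") then 2
  else if evs.any (fun e => pvTypeOf e == "holiday") then 3
  else 4

lemma pvRank_eq (e : List (String × String)) : pvRank e =
    if pvTypeOf e = "sabc_tournament" then 0
    else if pvTypeOf e = "club_event" then 1
    else if pvTypeOf e = "other_tournament" then 2
    else if pvTypeOf e = "holiday" then 3 else 4 := by
  unfold pvRank PySem.Dict.getD
  by_cases h0 : pvTypeOf e = "sabc_tournament"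
  · simp [PySem.Dict.get?_mk_cons, h0]
  · by_cases h1 : pvTypeOf e = "club_event"
    · simp [PySem.Dict.get?_mk_cons, h0, h1]
    · by_cases h2 : pvTypeOf e = "other_tournament"
      · simp [PySem.Dict.get?_mk_cons, h0, h1, h2]
      · by_cases h3 : pvTypeOf e = "holiday"
        · simp [PySem.Dict.get?_mk_cons, h0, h1, h2, h3]
        · simp [PySem.Dict.get?_mk_cons, PySem.Dict.get?, h0, h1, h2, h3,
            Ne.symm h0, Ne.symm h1, Ne.symm h2, Ne.symm h3]

lemma pvRank_le_four (e : List (String × String)) : pvRank e ≤ 4 := by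
  rw [pvRank_eq]; split_ifs <;> omega

lemma pvRank_min_chain (e : List (String × String)) (evs : List (List (String × String))) :
    min (pvRank e) (pvChain evs) = pvChain (e :: evs) := by
  simp only [pvRank_eq, pvChain, List.any_cons, Bool.or_eq_true, beq_iff_eq]
  split_ifs <;> first | rfl | omega | tauto

lemma foldl_min_eq_chain (evs : List (List (String × String))) (a : Int) (ha : a ≤ 4) :
    (evs.map pvRank).foldl min a = min a (pvChain evs) := by
  induction evs generalizing a with
  | nil => simp [pvChain, min_eq_left ha]
  | cons e t ih =>
    have := ih (min a (pvRank e)) (le_trans (min_le_left _ _) ha)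
    simp only [List.map_cons, List.foldl_cons, this, ← pvRank_min_chain e t, min_assoc]

lemma best_eq_chain (evs : List (List (String × String))) :
    (match PySem.List.min? (evs.map pvRank) (fun x => x) with
     | none => (4 : Int)
     | some m => m) = pvChain evs := by
  cases evs with
  | nil => simp [PySem.List.min?, pvChain]
  | cons e t =>
    simp only [List.map_cons, PySem.List.min?_id_cons]
    rw [foldl_min_eq_chain t (pvRank e) (pvRank_le_four e), pvRank_min_chain]

-- getD month [] agrees with the get? match of port A
lemma getD_month_eq (all_events : List (Int × List (Int × List (List (String × String))))) (month : Int) :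
    (PySem.Dict.mk all_events).getD month [] =
      ((PySem.Dict.mk all_events).get? month).getD [] := by
  simp [PySem.Dict.getD]

theorem add_event_marker_spec : Claim_equal_add_event_marker := by
  intro month day all_events _ _
  unfold Spec_add_event_marker add_event_marker add_event_marker_alt
  rw [getD_month_eq]
  cases hm : (PySem.Dict.mk all_events).get? month with
  | none => simp [PySem.Dict.get?]
  | some md =>
    simp only [Option.getD_some]
    cases hd : (PySem.Dict.mk md).get? day with
    | none => simp only [hd]
    | some evs =>
      simp only [hd, best_eq_chain, pvChain]
      cases h1 : evs.any (fun e => pvTypeOf e == "sabc_tournament") <;>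
        cases h2 : evs.any (fun e => pvTypeOf e == "club_event") <;>
          cases h3 : evs.any (fun e => pvTypeOf e == "holiday") <;>
            cases h4 : evs.any (fun e => pvTypeOf e == "other_tournament") <;>
              simp [h1, h2, h3, h4, pvMarks, PySem.List.pyGet?, PySem.List.pyIdx?]
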